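-- pv_equiv track=rewrite | github.com/chaofanwang123/My-Hackerrank-Solutions-Python- | Beautiful Quadruples.py | beautifulQuadruples
-- ===== SOURCE A (Python) =====
-- import bisect
-- from collections import defaultdict
--
-- def beautifulQuadruples(a, b, c, d):
--     a,b,c,d=sorted([a,b,c,d])
--     total=0
--     for i in range(1,a+1):
--         for j in range(i,b+1):
--             total+=(d+1-j+d+1-c)*(c+1-j)//2
--     D=defaultdict(list)
--     for i in range(1,a+1):
--         for j in range(i,b+1):
--             temp=i^j
--             bisect.insort(D[temp],j)
--     count=0
--     for i in range(1,c+1):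
--         for j in range(i,d+1):
--             temp=i^j
--             if temp in D and i>=D[temp][0]:
--                 index=bisect.bisect_right(D[temp],i)
--                 count+=index
--     return total-count
-- ===== SOURCE B (Python) =====
-- def beautifulQuadruples(a, b, c, d):
--     a, b, c, d = sorted([a, b, c, d])
--     if a < 1:
--         return 0
--     total = 0
--     for j in range(1, b + 1):
--         total += min(j, a) * ((d + 1 - j + d + 1 - c) * (c + 1 - j) // 2)
--     # sweep i upward, maintaining a counter of xors of all pairs (p, q) with q <= i:
--     # O(1) per query instead of a sorted-list bisect
--     cnt = {}
--     count = 0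
--     for i in range(1, c + 1):
--         if i <= b:
--             for p in range(1, min(i, a) + 1):
--                 x = p ^ i
--                 cnt[x] = cnt.get(x, 0) + 1
--         for j in range(i, d + 1):
--             count += cnt.get(i ^ j, 0)
--     return total - count
-- ===== Notes on version B (the rewrite author's own statement) =====
-- stated objective: faster
-- what changed: Replaces the per-XOR sorted lists with insort/bisect queries by a single increasing sweep over i that maintains a plain hash counter of xors of all pairs (p,q) with q<=i (O(1) per query), and collapses A's double loop for 'total' into one loop with a min(j,a) multiplier.
import Mathlib
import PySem

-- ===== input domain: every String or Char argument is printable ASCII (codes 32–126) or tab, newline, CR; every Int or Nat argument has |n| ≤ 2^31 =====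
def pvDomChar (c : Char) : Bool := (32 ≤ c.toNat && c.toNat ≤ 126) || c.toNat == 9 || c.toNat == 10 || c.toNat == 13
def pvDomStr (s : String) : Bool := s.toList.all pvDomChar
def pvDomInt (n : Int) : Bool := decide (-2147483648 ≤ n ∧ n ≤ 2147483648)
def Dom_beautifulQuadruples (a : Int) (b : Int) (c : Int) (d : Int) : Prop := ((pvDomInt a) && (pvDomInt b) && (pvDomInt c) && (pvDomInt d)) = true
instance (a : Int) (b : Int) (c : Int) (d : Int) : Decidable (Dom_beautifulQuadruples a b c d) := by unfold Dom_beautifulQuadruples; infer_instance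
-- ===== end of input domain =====

-- B replaces A's per-XOR insort/bisect sorted lists by an increasing sweep with a plain
-- counter of pair-xors (O(1) per query) and collapses A's double 'total' loop into one
-- loop with a min(j,a) multiplier; a timing run measured B faster.

-- ===== PORT A =====
-- bisect.insort on a list that is kept sorted (as A keeps D[temp]): insert v after the
-- entries ≤ v; exact for A, whose lists are always sorted ascending.
def pvInsort (l : List Int) (v : Int) : List Int :=
  l.takeWhile (fun y => y ≤ v) ++ v :: l.dropWhile (fun y => y ≤ v)

def pvABody (a : Int) (b : Int) (c : Int) (d : Int) : Int :=
  let total : Int := (PySem.List.pyRange 1 (a+1)).foldl (fun t i =>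
      (PySem.List.pyRange i (b+1)).foldl (fun t j =>
        t + PySem.Int.floordiv ((d+1-j+d+1-c)*(c+1-j)) 2) t) 0
  let D : PySem.Dict Int (List Int) := (PySem.List.pyRange 1 (a+1)).foldl (fun D i =>
      (PySem.List.pyRange i (b+1)).foldl (fun D j =>
        D.insert (PySem.Int.bxor i j) (pvInsort (D.getD (PySem.Int.bxor i j) []) j)) D)
      PySem.Dict.empty
  let count : Int := (PySem.List.pyRange 1 (c+1)).foldl (fun ct i =>
      (PySem.List.pyRange i (d+1)).foldl (fun ct j =>
        match PySem.Dict.get? D (PySem.Int.bxor i j) with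
        | none => ct                                  -- 'temp in D' is false
        | some l =>
          match PySem.List.pyGet? l 0 with            -- D[temp][0] (never IndexError: lists nonempty)
          | none => ct
          | some h => if h ≤ i then ct + ((PySem.List.bisectRight l i : Nat) : Int) else ct) ct) 0
  total - count

-- a,b,c,d = sorted([a,b,c,d]): sorted always has exactly 4 elements here
def beautifulQuadruples (a : Int) (b : Int) (c : Int) (d : Int) : Int :=
  let s := PySem.List.sorted [a, b, c, d] (fun x => x) false
  pvABody (s.headD 0) ((s.drop 1).headD 0) ((s.drop 2).headD 0) ((s.drop 3).headD 0)

-- ===== PORT B =====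
def pvBBody (a : Int) (b : Int) (c : Int) (d : Int) : Int :=
  if a < 1 then 0 else
  let total : Int := (PySem.List.pyRange 1 (b+1)).foldl (fun t j =>
      t + min j a * PySem.Int.floordiv ((d+1-j+d+1-c)*(c+1-j)) 2) 0
  let st : PySem.Dict Int Int × Int := (PySem.List.pyRange 1 (c+1)).foldl (fun st i =>
      let cnt := if i ≤ b then
          (PySem.List.pyRange 1 (min i a + 1)).foldl (fun cnt p =>
            cnt.insert (PySem.Int.bxor p i) (cnt.getD (PySem.Int.bxor p i) 0 + 1)) st.1
        else st.1
      (cnt, (PySem.List.pyRange i (d+1)).foldl (fun s j =>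
        s + cnt.getD (PySem.Int.bxor i j) 0) st.2)) (PySem.Dict.empty, 0)
  total - st.2

-- a,b,c,d = sorted([a,b,c,d]): sorted always has exactly 4 elements here
def beautifulQuadruples_alt (a : Int) (b : Int) (c : Int) (d : Int) : Int :=
  let s := PySem.List.sorted [a, b, c, d] (fun x => x) false
  pvBBody (s.headD 0) ((s.drop 1).headD 0) ((s.drop 2).headD 0) ((s.drop 3).headD 0)

-- ===== PRECONDITION & SPEC =====
def Spec_beautifulQuadruples (a : Int) (b : Int) (c : Int) (d : Int) (out : Int) : Prop := out = beautifulQuadruples_alt a b c d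
instance (a : Int) (b : Int) (c : Int) (d : Int) (out : Int) : Decidable (Spec_beautifulQuadruples a b c d out) := by unfold Spec_beautifulQuadruples; infer_instance

-- ===== CLAIM (what is proved, stated in full; the proofs are below) =====
def Claim_equal_beautifulQuadruples : Prop := ∀ (a : Int) (b : Int) (c : Int) (d : Int), Dom_beautifulQuadruples a b c d → Spec_beautifulQuadruples a b c d (beautifulQuadruples a b c d)

-- ===== LEMMAS AND PROOFS =====

-- the list of (i, j) pairs that A's build loops run over
def pvPairs (a b : Int) : List (Int × Int) :=
  (PySem.List.pyRange 1 (a+1)).flatMap (fun p => (PySem.List.pyRange p (b+1)).map (fun q => (p, q)))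

-- number of build pairs with xor x whose second component is ≤ i
def pvS (a b i x : Int) : Nat :=
  ((pvPairs a b).filter (fun pq => PySem.Int.bxor pq.1 pq.2 == x && decide (pq.2 ≤ i))).length

-- A's dictionary as a single fold over the pair list
def pvBuildD (P : List (Int × Int)) : PySem.Dict Int (List Int) :=
  P.foldl (fun D pq =>
    D.insert (PySem.Int.bxor pq.1 pq.2) (pvInsort (D.getD (PySem.Int.bxor pq.1 pq.2) []) pq.2))
    PySem.Dict.empty

-- second components of the pairs of P with the given xor
def pvJs (P : List (Int × Int)) (x : Int) : List Int :=
  (P.filter (fun pq => PySem.Int.bxor pq.1 pq.2 == x)).map (·.2)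

-- the xors B adds to its counter at sweep step q
def pvAddList (a b q : Int) : List Int :=
  if q ≤ b then (PySem.List.pyRange 1 (min q a + 1)).map (fun p => PySem.Int.bxor p q) else []

-- all xors in B's counter once the sweep has passed i
def pvX (a b i : Int) : List Int := (PySem.List.pyRange 1 (i+1)).flatMap (pvAddList a b)

-- the pairs behind pvX, in B's sweep order
def pvPairsB (a b i : Int) : List (Int × Int) :=
  (PySem.List.pyRange 1 (i+1)).flatMap
    (fun q => if q ≤ b then (PySem.List.pyRange 1 (min q a + 1)).map (fun p => (p, q)) else [])

-- B's outer loop body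
def pvBStep (a b d : Int) (st : PySem.Dict Int Int × Int) (i : Int) : PySem.Dict Int Int × Int :=
  let cnt := if i ≤ b then
      (PySem.List.pyRange 1 (min i a + 1)).foldl (fun cnt p =>
        cnt.insert (PySem.Int.bxor p i) (cnt.getD (PySem.Int.bxor p i) 0 + 1)) st.1
    else st.1
  (cnt, (PySem.List.pyRange i (d+1)).foldl (fun s j => s + cnt.getD (PySem.Int.bxor i j) 0) st.2)

lemma pvInsort_perm (l : List Int) (v : Int) : (pvInsort l v).Perm (v :: l) := by
  unfold pvInsort
  have h := List.perm_middle (a := v) (l₁ := l.takeWhile (fun y => decide (y ≤ v)))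
      (l₂ := l.dropWhile (fun y => decide (y ≤ v)))
  simpa [List.takeWhile_append_dropWhile] using h

lemma pvInsort_pairwise (l : List Int) (v : Int) (h : l.Pairwise (· ≤ ·)) :
    (pvInsort l v).Pairwise (· ≤ ·) := by
  unfold pvInsort
  have hsplit := List.takeWhile_append_dropWhile (p := fun y : Int => decide (y ≤ v)) (l := l)
  have hP : (l.takeWhile (fun y => decide (y ≤ v)) ++ l.dropWhile (fun y => decide (y ≤ v))).Pairwise (· ≤ ·) := by
    rw [hsplit]; exact h
  rw [List.pairwise_append] at hP
  obtain ⟨ht, hdp, htd⟩ := hP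
  have hvd : ∀ y ∈ l.dropWhile (fun y => decide (y ≤ v)), v ≤ y := by
    intro y hy
    rcases hdd : l.dropWhile (fun y => decide (y ≤ v)) with _ | ⟨h1, tl⟩
    · rw [hdd] at hy; simp at hy
    · have hne : l.dropWhile (fun y => decide (y ≤ v)) ≠ [] := by rw [hdd]; simp
      have hh1 := List.head_dropWhile_not (fun y : Int => decide (y ≤ v)) hne
      rw [hdd] at hy
      have hdp' := hdp
      rw [hdd] at hdp'
      simp only [hdd, List.head_cons, decide_eq_false_iff_not, not_le] at hh1
      rcases List.mem_cons.mp hy with rfl | hy'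
      · omega
      · have := (List.pairwise_cons.mp hdp').1 y hy'; omega
  rw [List.pairwise_append]
  refine ⟨ht, List.pairwise_cons.mpr ⟨hvd, hdp⟩, ?_⟩
  intro a ha y hy
  have hav : a ≤ v := by
    have := List.mem_takeWhile_imp ha; simpa using this
  rcases List.mem_cons.mp hy with rfl | hy'
  · exact hav
  · exact le_trans hav (hvd y hy')

lemma pvBisect_count (l : List Int) (v : Int) (h : l.Pairwise (· ≤ ·)) :
    (PySem.List.bisectRight l v : Nat) = l.countP (fun y => decide (y ≤ v)) := by
  obtain ⟨hk, hlt, hge⟩ := PySem.List.bisectRight_spec l v h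
  set k := PySem.List.bisectRight l v with hkdef
  have hlen : (l.take k).length = k := by simp [List.length_take]; omega
  have h1 : (l.take k).countP (fun y => decide (y ≤ v)) = k := by
    have hall : ∀ x ∈ l.take k, decide (x ≤ v) = true := by
      intro x hx
      obtain ⟨i, hi, hxe⟩ := List.mem_iff_getElem.mp hx
      have hik : i < k := by rw [hlen] at hi; exact hi
      have hil : i < l.length := by omega
      have he : (l.take k)[i] = l[i] := List.getElem_take
      rw [he] at hxe
      subst hxe
      exact decide_eq_true (hlt i hil hik)
    calc (l.take k).countP (fun y => decide (y ≤ v)) = (l.take k).length :=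
          List.countP_eq_length.mpr hall
      _ = k := hlen
  have h2 : (l.drop k).countP (fun y => decide (y ≤ v)) = 0 := by
    rw [List.countP_eq_zero]
    intro x hx
    obtain ⟨i, hi, hxe⟩ := List.mem_iff_getElem.mp hx
    have hil : k + i < l.length := by
      have h3 := hi
      simp only [List.length_drop] at h3
      omega
    have hgt := hge (k + i) hil (by omega)
    have he : (l.drop k)[i] = l[k + i] := List.getElem_drop
    rw [he] at hxe
    subst hxe
    simp
    omega
  conv_rhs => rw [← List.take_append_drop k l]
  rw [List.countP_append, h1, h2]
  omega

lemma pvIteSum (b : Int) (F : Int → Int) (n : Nat) :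
    ((PySem.List.pyRange 1 (b+1)).map (fun j => if (n : Int)+1 ≤ j then F j else 0)).sum
      = ((PySem.List.pyRange ((n : Int)+1) (b+1)).map F).sum := by
  by_cases hb : b ≤ (n : Int)
  · rw [PySem.List.pyRange_one_eq_nil (a := (n:Int)+1) (by omega)]
    simp only [List.map_nil, List.sum_nil]
    apply List.sum_eq_zero
    intro x hx
    obtain ⟨j, hj, hxe⟩ := List.mem_map.mp hx
    have := PySem.List.mem_pyRange_one.mp hj
    rw [if_neg (by omega)] at hxe
    omega
  · rw [PySem.List.pyRange_one_append 1 ((n:Int)+1) (b+1) (by omega) (by omega)]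
    rw [List.map_append, List.sum_append]
    have h1 : ((PySem.List.pyRange 1 ((n:Int)+1)).map (fun j => if (n : Int)+1 ≤ j then F j else 0)).sum = 0 := by
      apply List.sum_eq_zero
      intro x hx
      obtain ⟨j, hj, hxe⟩ := List.mem_map.mp hx
      have := PySem.List.mem_pyRange_one.mp hj
      rw [if_neg (by omega)] at hxe
      omega
    have h2 : ((PySem.List.pyRange ((n:Int)+1) (b+1)).map (fun j => if (n : Int)+1 ≤ j then F j else 0))
        = ((PySem.List.pyRange ((n:Int)+1) (b+1)).map F) := by
      apply List.map_congr_left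
      intro j hj
      have := PySem.List.mem_pyRange_one.mp hj
      rw [if_pos (by omega)]
    rw [h1, h2]
    omega

lemma pvSwapSum (b : Int) (F : Int → Int) : ∀ n : Nat,
    ((PySem.List.pyRange 1 ((n : Int)+1)).map
        (fun i => ((PySem.List.pyRange i (b+1)).map F).sum)).sum
      = ((PySem.List.pyRange 1 (b+1)).map (fun j => min j (n : Int) * F j)).sum := by
  intro n
  induction n with
  | zero =>
    rw [PySem.List.pyRange_one_eq_nil (by omega)]
    simp only [List.map_nil, List.sum_nil]
    symm
    apply List.sum_eq_zero
    intro x hx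
    obtain ⟨j, hj, hxe⟩ := List.mem_map.mp hx
    have := PySem.List.mem_pyRange_one.mp hj
    have hmin : min j ((0:Nat) : Int) = 0 := by omega
    rw [hmin] at hxe
    omega
  | succ n ih =>
    have hcast : (((n+1 : Nat)) : Int) + 1 = ((n : Int) + 1) + 1 := by push_cast; ring
    rw [hcast]
    rw [PySem.List.pyRange_one_succ_right (by omega)]
    rw [List.map_append, List.sum_append]
    rw [ih]
    have hpt : ((PySem.List.pyRange 1 (b+1)).map (fun j => min j (((n+1:Nat)) : Int) * F j))
        = ((PySem.List.pyRange 1 (b+1)).map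
            (fun j => min j ((n:Int)) * F j + (if (n : Int)+1 ≤ j then F j else 0))) := by
      apply List.map_congr_left
      intro j hj
      have := PySem.List.mem_pyRange_one.mp hj
      by_cases hle : (n : Int)+1 ≤ j
      · have h1 : min j (((n+1:Nat)) : Int) = (n : Int)+1 := by push_cast; omega
        have h2 : min j ((n:Int)) = (n : Int) := by omega
        rw [h1, h2, if_pos hle]; ring
      · have h1 : min j (((n+1:Nat)) : Int) = j := by push_cast; omega
        have h2 : min j ((n:Int)) = j := by omega
        rw [h1, h2, if_neg hle]; ring
    rw [hpt, PySem.List.sum_map_add_int, pvIteSum]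
    simp

lemma pvBuildD_inv (P : List (Int × Int)) (x : Int) :
    ((pvBuildD P).getD x []).Pairwise (· ≤ ·) ∧ ((pvBuildD P).getD x []).Perm (pvJs P x) := by
  induction P using List.reverseRecOn with
  | nil => simp [pvBuildD, pvJs, PySem.Dict.getD_empty]
  | append_singleton P e ih =>
    have hstep : pvBuildD (P ++ [e])
        = (pvBuildD P).insert (PySem.Int.bxor e.1 e.2)
            (pvInsort ((pvBuildD P).getD (PySem.Int.bxor e.1 e.2) []) e.2) := by
      unfold pvBuildD
      rw [List.foldl_append]
      simp
    have hjs : pvJs (P ++ [e]) x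
        = pvJs P x ++ (if PySem.Int.bxor e.1 e.2 == x then [e.2] else []) := by
      unfold pvJs
      rw [List.filter_append, List.map_append]
      congr 1
      by_cases hx : PySem.Int.bxor e.1 e.2 == x <;> simp [List.filter, hx]
    rw [hstep, hjs]
    by_cases hx : x = PySem.Int.bxor e.1 e.2
    · subst hx
      rw [PySem.Dict.getD_insert]
      rw [if_pos rfl]
      simp only [beq_self_eq_true, if_pos]
      constructor
      · exact pvInsort_pairwise _ _ ih.1
      · have p1 := pvInsort_perm ((pvBuildD P).getD (PySem.Int.bxor e.1 e.2) []) e.2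
        have p2 := (ih.2).cons e.2
        have p3 := List.perm_append_singleton e.2 (pvJs P (PySem.Int.bxor e.1 e.2))
        exact (p1.trans p2).trans p3.symm
    · rw [PySem.Dict.getD_insert, if_neg hx]
      have hbeq : (PySem.Int.bxor e.1 e.2 == x) = false := by
        simp; omega
      rw [hbeq]
      simpa using ih

lemma pvX_eq_map (a b i : Int) :
    pvX a b i = (pvPairsB a b i).map (fun pq => PySem.Int.bxor pq.1 pq.2) := by
  unfold pvX pvPairsB pvAddList
  rw [List.map_flatMap]
  apply List.flatMap_congr
  intro q _
  by_cases hq : q ≤ b <;> simp [hq, List.map_map, Function.comp_def]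

lemma mem_pvPairsB (a b i p q : Int) :
    (p, q) ∈ pvPairsB a b i ↔ 1 ≤ q ∧ q ≤ i ∧ q ≤ b ∧ 1 ≤ p ∧ p ≤ q ∧ p ≤ a := by
  unfold pvPairsB
  simp only [List.mem_flatMap, PySem.List.mem_pyRange_one]
  constructor
  · rintro ⟨q', hq', hmem⟩
    by_cases hqb : q' ≤ b
    · rw [if_pos hqb] at hmem
      obtain ⟨p', hp', hpe⟩ := List.mem_map.mp hmem
      rw [PySem.List.mem_pyRange_one] at hp'
      obtain ⟨rfl, rfl⟩ : p' = p ∧ q' = q := by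
        simpa [Prod.ext_iff] using hpe
      omega
    · rw [if_neg hqb] at hmem; simp at hmem
  · rintro ⟨h1, h2, h3, h4, h5, h6⟩
    exact ⟨q, by omega, by
      rw [if_pos h3]
      exact List.mem_map.mpr ⟨p, PySem.List.mem_pyRange_one.mpr (by omega), rfl⟩⟩

lemma mem_pvPairs (a b p q : Int) :
    (p, q) ∈ pvPairs a b ↔ 1 ≤ p ∧ p ≤ a ∧ p ≤ q ∧ q ≤ b := by
  unfold pvPairs
  simp only [List.mem_flatMap, PySem.List.mem_pyRange_one, List.mem_map]
  constructor
  · rintro ⟨p', hp', q', hq', hpe⟩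
    obtain ⟨rfl, rfl⟩ : p' = p ∧ q' = q := by simpa [Prod.ext_iff] using hpe
    omega
  · rintro ⟨h1, h2, h3, h4⟩
    refine ⟨p, by omega, q, ?_, rfl⟩
    omega

lemma pvSndInner (a b q : Int) (pr : Int × Int)
    (h : pr ∈ (if q ≤ b then (PySem.List.pyRange 1 (min q a + 1)).map (fun p => (p, q)) else [])) :
    pr.2 = q := by
  by_cases hq : q ≤ b
  · rw [if_pos hq] at h
    obtain ⟨p', _, hpe⟩ := List.mem_map.mp h
    rw [← hpe]
  · rw [if_neg hq] at h; simp at h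

lemma nodup_pvPairsB (a b i : Int) : (pvPairsB a b i).Nodup := by
  unfold pvPairsB
  rw [List.nodup_flatMap]
  constructor
  · intro q _
    by_cases hq : q ≤ b
    · rw [if_pos hq]
      exact (PySem.List.nodup_pyRange_one _ _).map (fun p p' h => by simpa [Prod.ext_iff] using h)
    · rw [if_neg hq]; exact List.nodup_nil
  · refine (PySem.List.pairwise_lt_pyRange_one 1 (i+1)).imp ?_
    intro q1 q2 hlt pr h1 h2
    have e1 := pvSndInner a b q1 pr h1
    have e2 := pvSndInner a b q2 pr h2
    omega

lemma nodup_pvPairs (a b : Int) : (pvPairs a b).Nodup := by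
  unfold pvPairs
  rw [List.nodup_flatMap]
  constructor
  · intro p _
    exact (PySem.List.nodup_pyRange_one _ _).map (fun q q' h => by simpa [Prod.ext_iff] using h)
  · refine (PySem.List.pairwise_lt_pyRange_one 1 (a+1)).imp ?_
    intro p1 p2 hlt pr h1 h2
    obtain ⟨q1, _, he1⟩ := List.mem_map.mp h1
    obtain ⟨q2, _, he2⟩ := List.mem_map.mp h2
    have : pr.1 = p1 := by rw [← he1]
    have : pr.1 = p2 := by rw [← he2]
    omega

lemma pvCount_eq_pvS (a b i x : Int) : (pvX a b i).count x = pvS a b i x := by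
  rw [pvX_eq_map]
  rw [List.count_eq_countP, List.countP_map]
  rw [List.countP_eq_length_filter]
  unfold pvS
  have n1 : ((pvPairsB a b i).filter ((fun y => y == x) ∘ fun pq => PySem.Int.bxor pq.1 pq.2)).Nodup :=
    (nodup_pvPairsB a b i).filter _
  have n2 : ((pvPairs a b).filter (fun pq => PySem.Int.bxor pq.1 pq.2 == x && decide (pq.2 ≤ i))).Nodup :=
    (nodup_pvPairs a b).filter _
  rw [← List.toFinset_card_of_nodup n1, ← List.toFinset_card_of_nodup n2]
  congr 1
  apply Finset.ext
  rintro ⟨p, q⟩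
  simp only [List.mem_toFinset, List.mem_filter, mem_pvPairsB, mem_pvPairs,
    Function.comp_apply, beq_iff_eq, Bool.and_eq_true, decide_eq_true_eq]
  constructor
  · rintro ⟨⟨h1, h2, h3, h4, h5, h6⟩, hx⟩
    exact ⟨⟨by omega, by omega, by omega, by omega⟩, hx, by omega⟩
  · rintro ⟨⟨h1, h2, h3, h4⟩, hx, hi⟩
    exact ⟨⟨by omega, by omega, by omega, by omega, by omega, by omega⟩, hx⟩

lemma pvD_eq (a b : Int) :
    (PySem.List.pyRange 1 (a+1)).foldl (fun D i =>
      (PySem.List.pyRange i (b+1)).foldl (fun D j =>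
        D.insert (PySem.Int.bxor i j) (pvInsort (D.getD (PySem.Int.bxor i j) []) j)) D)
      PySem.Dict.empty = pvBuildD (pvPairs a b) := by
  unfold pvBuildD pvPairs
  rw [List.foldl_flatMap]
  apply PySem.List.foldl_congr_mem
  intro D p _
  rw [List.foldl_map]

lemma pvJs_countP (a b i x : Int) :
    (pvJs (pvPairs a b) x).countP (fun q => decide (q ≤ i)) = pvS a b i x := by
  unfold pvJs pvS
  rw [List.countP_map, List.countP_filter, ← List.countP_eq_length_filter]
  apply List.countP_congr
  intro pq _
  simp [Bool.and_comm]

lemma pvAQuery (a b i x : Int) :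
    (match PySem.Dict.get? (pvBuildD (pvPairs a b)) x with
     | none => (0:Int)
     | some l =>
       match PySem.List.pyGet? l 0 with
       | none => (0:Int)
       | some h => if h ≤ i then ((PySem.List.bisectRight l i : Nat) : Int) else 0)
    = (pvS a b i x : Int) := by
  obtain ⟨hpw, hperm⟩ := pvBuildD_inv (pvPairs a b) x
  rw [← pvJs_countP a b i x]
  cases hg : PySem.Dict.get? (pvBuildD (pvPairs a b)) x with
  | none =>
    have hld : (pvBuildD (pvPairs a b)).getD x [] = [] := PySem.Dict.getD_of_get?_eq_none _ _ hg
    rw [hld] at hperm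
    have : pvJs (pvPairs a b) x = [] := (hperm.symm).eq_nil
    simp [this]
  | some l =>
    have hld : (pvBuildD (pvPairs a b)).getD x [] = l := PySem.Dict.getD_of_get?_eq_some _ _ hg
    rw [hld] at hpw hperm
    cases l with
    | nil =>
      have : pvJs (pvPairs a b) x = [] := (hperm.symm).eq_nil
      dsimp only
      simp [this, PySem.List.pyGet?]
    | cons h t =>
      have hget : PySem.List.pyGet? (h :: t) 0 = some h := by simp [PySem.List.pyGet?, PySem.List.pyIdx?]
      dsimp only
      rw [hget]
      dsimp only
      by_cases hh : h ≤ i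
      · rw [if_pos hh]
        rw [pvBisect_count _ _ hpw]
        rw [hperm.countP_eq]
      · rw [if_neg hh]
        have hz : (h :: t).countP (fun y => decide (y ≤ i)) = 0 := by
          rw [List.countP_eq_zero]
          intro y hy
          rcases List.mem_cons.mp hy with rfl | hy'
          · simpa using hh
          · have := (List.pairwise_cons.mp hpw).1 y hy'
            simp; omega
        rw [← hperm.countP_eq, hz]
        simp

lemma pvMatchShift (D : PySem.Dict Int (List Int)) (x i ct : Int) :
    (match PySem.Dict.get? D x with
     | none => ct
     | some l =>
       match PySem.List.pyGet? l 0 with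
       | none => ct
       | some h => if h ≤ i then ct + ((PySem.List.bisectRight l i : Nat) : Int) else ct)
    = ct + (match PySem.Dict.get? D x with
     | none => (0:Int)
     | some l =>
       match PySem.List.pyGet? l 0 with
       | none => (0:Int)
       | some h => if h ≤ i then ((PySem.List.bisectRight l i : Nat) : Int) else 0) := by
  cases PySem.Dict.get? D x with
  | none => simp
  | some l =>
    dsimp only
    cases hg2 : PySem.List.pyGet? l 0 with
    | none => simp
    | some h => by_cases hh : h ≤ i <;> simp [hh]

lemma pvACount (a b c d : Int) :
    (PySem.List.pyRange 1 (c+1)).foldl (fun ct i =>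
      (PySem.List.pyRange i (d+1)).foldl (fun ct j =>
        match PySem.Dict.get? (pvBuildD (pvPairs a b)) (PySem.Int.bxor i j) with
        | none => ct
        | some l =>
          match PySem.List.pyGet? l 0 with
          | none => ct
          | some h => if h ≤ i then ct + ((PySem.List.bisectRight l i : Nat) : Int) else ct) ct) 0
    = ((PySem.List.pyRange 1 (c+1)).map (fun i =>
        ((PySem.List.pyRange i (d+1)).map (fun j => (pvS a b i (PySem.Int.bxor i j) : Int))).sum)).sum := by
  have hinner : ∀ i ct, (PySem.List.pyRange i (d+1)).foldl (fun ct j =>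
        match PySem.Dict.get? (pvBuildD (pvPairs a b)) (PySem.Int.bxor i j) with
        | none => ct
        | some l =>
          match PySem.List.pyGet? l 0 with
          | none => ct
          | some h => if h ≤ i then ct + ((PySem.List.bisectRight l i : Nat) : Int) else ct) ct
      = ct + ((PySem.List.pyRange i (d+1)).map (fun j => (pvS a b i (PySem.Int.bxor i j) : Int))).sum := by
    intro i ct
    rw [PySem.List.foldl_congr_mem _ _
        (fun ct j => ct + (match PySem.Dict.get? (pvBuildD (pvPairs a b)) (PySem.Int.bxor i j) with
          | none => (0:Int)
          | some l =>
            match PySem.List.pyGet? l 0 with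
            | none => (0:Int)
            | some h => if h ≤ i then ((PySem.List.bisectRight l i : Nat) : Int) else 0)) ct
        (fun acc x _ => pvMatchShift _ _ _ _)]
    rw [PySem.List.foldl_add,
      List.map_congr_left (fun j _ => pvAQuery a b i (PySem.Int.bxor i j))]
  rw [PySem.List.foldl_congr_mem _ _
      (fun ct i => ct + ((PySem.List.pyRange i (d+1)).map (fun j => (pvS a b i (PySem.Int.bxor i j) : Int))).sum) 0
      (fun acc i _ => hinner i acc)]
  rw [PySem.List.foldl_add]
  simp

lemma pvFoldIns (l : List Int) (f : Int → Int) (d0 : PySem.Dict Int Int) :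
    l.foldl (fun cnt p => cnt.insert (f p) (cnt.getD (f p) 0 + 1)) d0
      = (l.map f).foldl (fun cnt x => cnt.insert x (cnt.getD x 0 + 1)) d0 := by
  rw [List.foldl_map]

lemma pvXsucc (a b : Int) (m : Int) (hm : 0 ≤ m) :
    pvX a b (m+1) = pvX a b m ++ pvAddList a b (m+1) := by
  unfold pvX
  rw [PySem.List.pyRange_one_succ_right (by omega), List.flatMap_append]
  simp

lemma pvCntStep (a b : Int) (m : Int) (st1 : PySem.Dict Int Int)
    (ihx : ∀ x, st1.getD x 0 = ((pvX a b m).count x : Int)) (hm : 0 ≤ m) :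
    ∀ x, (if (m+1) ≤ b then
        (PySem.List.pyRange 1 (min (m+1) a + 1)).foldl (fun cnt p =>
          cnt.insert (PySem.Int.bxor p (m+1)) (cnt.getD (PySem.Int.bxor p (m+1)) 0 + 1)) st1
      else st1).getD x 0 = ((pvX a b (m+1)).count x : Int) := by
  intro x
  rw [pvXsucc a b m hm, List.count_append]
  by_cases hb : (m+1) ≤ b
  · rw [if_pos hb, pvFoldIns, PySem.Dict.getD_foldl_insert_add_one, ihx x]
    have : pvAddList a b (m+1) = (PySem.List.pyRange 1 (min (m+1) a + 1)).map (fun p => PySem.Int.bxor p (m+1)) := by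
      unfold pvAddList; rw [if_pos hb]
    rw [this]
    push_cast
    ring
  · rw [if_neg hb]
    have : pvAddList a b (m+1) = [] := by unfold pvAddList; rw [if_neg hb]
    rw [this]
    simp [ihx x]

lemma pvBState (a b d : Int) (n : Nat) :
    (∀ x, (((PySem.List.pyRange 1 ((n:Int)+1)).foldl (pvBStep a b d) (PySem.Dict.empty, 0)).1).getD x 0
        = ((pvX a b (n:Int)).count x : Int))
    ∧ ((PySem.List.pyRange 1 ((n:Int)+1)).foldl (pvBStep a b d) (PySem.Dict.empty, 0)).2
        = ((PySem.List.pyRange 1 ((n:Int)+1)).map (fun i =>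
            ((PySem.List.pyRange i (d+1)).map (fun j => ((pvX a b i).count (PySem.Int.bxor i j) : Int))).sum)).sum := by
  induction n with
  | zero =>
    rw [PySem.List.pyRange_one_eq_nil (by omega)]
    constructor
    · intro x
      have : pvX a b ((0:Nat):Int) = [] := by
        unfold pvX
        rw [PySem.List.pyRange_one_eq_nil (by omega)]
        simp
      simp [PySem.Dict.getD_empty]
    · simp
  | succ n ih =>
    have hcast : (((n+1 : Nat)) : Int) + 1 = ((n : Int) + 1) + 1 := by push_cast; ring
    have hc2 : (((n+1 : Nat)) : Int) = (n : Int) + 1 := by push_cast; ring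
    rw [hcast, PySem.List.pyRange_one_succ_right (by omega), List.foldl_append,
      List.foldl_cons, List.foldl_nil]
    have hm : (0:Int) ≤ (n:Int) := by omega
    have hP1 := pvCntStep a b (n:Int)
      ((PySem.List.pyRange 1 ((n:Int)+1)).foldl (pvBStep a b d) (PySem.Dict.empty, 0)).1 ih.1 hm
    constructor
    · intro x
      rw [hc2]
      dsimp only [pvBStep]
      exact hP1 x
    · rw [List.map_append, List.sum_append]
      dsimp only [pvBStep]
      rw [PySem.List.foldl_add, ih.2]
      congr 1
      simp only [List.map_cons, List.map_nil, List.sum_cons, List.sum_nil, add_zero]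
      refine congrArg List.sum (List.map_congr_left ?_)
      intro j _
      exact hP1 (PySem.Int.bxor ((n:Int)+1) j)
lemma pvATotal (a b c d : Int) :
    (PySem.List.pyRange 1 (a+1)).foldl (fun t i =>
      (PySem.List.pyRange i (b+1)).foldl (fun t j =>
        t + PySem.Int.floordiv ((d+1-j+d+1-c)*(c+1-j)) 2) t) 0
    = if a < 1 then 0
      else (PySem.List.pyRange 1 (b+1)).foldl (fun t j =>
        t + min j a * PySem.Int.floordiv ((d+1-j+d+1-c)*(c+1-j)) 2) 0 := by
  have hinner : ∀ (t i : Int), (PySem.List.pyRange i (b+1)).foldl (fun t j =>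
        t + PySem.Int.floordiv ((d+1-j+d+1-c)*(c+1-j)) 2) t
      = t + ((PySem.List.pyRange i (b+1)).map
          (fun j => PySem.Int.floordiv ((d+1-j+d+1-c)*(c+1-j)) 2)).sum :=
    fun t i => PySem.List.foldl_add _ _ _
  rw [PySem.List.foldl_congr_mem _ _
    (fun t i => t + ((PySem.List.pyRange i (b+1)).map
      (fun j => PySem.Int.floordiv ((d+1-j+d+1-c)*(c+1-j)) 2)).sum) 0
    (fun acc i _ => hinner acc i)]
  rw [PySem.List.foldl_add]
  by_cases ha : a < 1
  · rw [if_pos ha, PySem.List.pyRange_one_eq_nil (by omega)]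
    simp
  · rw [if_neg ha, PySem.List.foldl_add]
    have hn : ((a.toNat : Int)) = a := by omega
    have hs := pvSwapSum b (fun j => PySem.Int.floordiv ((d+1-j+d+1-c)*(c+1-j)) 2) a.toNat
    rw [hn] at hs
    rw [hs]

theorem pvCore (a b c d : Int) : pvABody a b c d = pvBBody a b c d := by
  simp only [pvABody, pvBBody]
  by_cases ha : a < 1
  · rw [if_pos ha]
    have hr : PySem.List.pyRange 1 (a+1) = [] := PySem.List.pyRange_one_eq_nil (by omega)
    rw [hr]
    simp only [List.foldl_nil]
    have hz : ∀ (ct i : Int), (PySem.List.pyRange i (d+1)).foldl (fun ct j =>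
        match PySem.Dict.get? (PySem.Dict.empty : PySem.Dict Int (List Int)) (PySem.Int.bxor i j) with
        | none => ct
        | some l =>
          match PySem.List.pyGet? l 0 with
          | none => ct
          | some h => if h ≤ i then ct + ((PySem.List.bisectRight l i : Nat) : Int) else ct) ct = ct := by
      intro ct i
      rw [PySem.List.foldl_congr_mem _ _ (fun ct _ => ct) ct ?_]
      · exact PySem.List.foldl_ignore _ _
      · intro acc x _
        rw [PySem.Dict.get?_empty]
    rw [PySem.List.foldl_congr_mem _ _ (fun ct _ => ct) 0 (fun acc i _ => hz acc i),
      PySem.List.foldl_ignore]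
    simp
  · rw [if_neg ha, pvATotal, if_neg ha, pvD_eq a b, pvACount a b c d]
    have hB2 : (List.foldl (pvBStep a b d) (PySem.Dict.empty, (0:Int)) (PySem.List.pyRange 1 (c+1))).2
        = ((PySem.List.pyRange 1 (c+1)).map (fun i =>
            ((PySem.List.pyRange i (d+1)).map
              (fun j => (pvS a b i (PySem.Int.bxor i j) : Int))).sum)).sum := by
      by_cases hc : c < 1
      · rw [PySem.List.pyRange_one_eq_nil (show c+1 ≤ 1 by omega)]
        simp
      · have hn : ((c.toNat : Int)) = c := by omega
        have hBs := (pvBState a b d c.toNat).2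
        rw [hn] at hBs
        rw [hBs]
        refine congrArg List.sum (List.map_congr_left ?_)
        intro i _
        refine congrArg List.sum (List.map_congr_left ?_)
        intro j _
        rw [pvCount_eq_pvS]
    rw [← hB2]
    rfl

theorem pvWrap (a b c d : Int) :
    beautifulQuadruples a b c d = beautifulQuadruples_alt a b c d := by
  have h4 : (PySem.List.sorted [a, b, c, d] (fun x => x) false).length = 4 := by
    simp [PySem.List.length_sorted]
  unfold beautifulQuadruples beautifulQuadruples_alt
  rcases hs : PySem.List.sorted [a, b, c, d] (fun x => x) false with _ | ⟨w, _ | ⟨x, _ | ⟨y, _ | ⟨z, _ | ⟨u, t⟩⟩⟩⟩⟩ <;>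
    simp_all [pvCore]

-- ===== VERDICT (by name: the statement is the Claim_ definition above) =====
theorem beautifulQuadruples_spec : Claim_equal_beautifulQuadruples := by
  intro a b c d _
  unfold Spec_beautifulQuadruples
  exact pvWrap a b c d
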